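-- pv_equiv track=rewrite | github.com/iestynmullinor/leetcode_solutions | skyrealproper2.py | solution
-- ===== SOURCE A (Python) =====
-- def addDigits(num):
--     stringVal = str(num)
--     intArray = map(int, stringVal.strip())
--     return sum(intArray)
--
-- def findMaxFromGroup(vals):
--     largest = max(vals)
--     vals.remove(largest)
--     secondLargest = max(vals)
--     return largest+secondLargest
--
-- def solution(S):
--
--     valSumDict = {}
--
--     #creates dictionary of groups of numbers with same digitSum and their values
--     for s in S:
--         sumOfDigits = addDigits(s)
--         if sumOfDigits in valSumDict:
--             valSumDict[sumOfDigits].append(s)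
--         else:
--             valSumDict.update({sumOfDigits : [s]})
--
--
--     maxValue = -1
--     #for each group of numbers, finds the largest 2 digit sum
--     for listOfNos in valSumDict.values():
--         if len(listOfNos) >=2:
--             biggestSum = findMaxFromGroup(listOfNos)
--             if biggestSum > maxValue:
--                 maxValue = biggestSum
--
--     return maxValue
-- ===== SOURCE B (Python) =====
-- def solution(S):
--     # one pass: per digit-sum key keep only the two largest values seen so far
--     top = {}
--     for s in S:
--         k = sum(map(int, str(s).strip()))
--         if k in top:
--             a, b = top[k]
--             if b is None:
--                 top[k] = (s, a) if s >= a else (a, s)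
--             elif s >= a:
--                 top[k] = (s, a)
--             elif s > b:
--                 top[k] = (a, s)
--         else:
--             top[k] = (s, None)
--     best = -1
--     for a, b in top.values():
--         if b is not None and a + b > best:
--             best = a + b
--     return best
-- ===== Notes on version B (the rewrite author's own statement) =====
-- stated objective: alternative
-- what changed: Instead of building per-digit-sum lists in a dict and then re-scanning each list with max/remove/max, B keeps only the (largest, second-largest) pair per digit-sum key, updated in the single pass over S, and finally takes the best pair sum.
import Mathlib
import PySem

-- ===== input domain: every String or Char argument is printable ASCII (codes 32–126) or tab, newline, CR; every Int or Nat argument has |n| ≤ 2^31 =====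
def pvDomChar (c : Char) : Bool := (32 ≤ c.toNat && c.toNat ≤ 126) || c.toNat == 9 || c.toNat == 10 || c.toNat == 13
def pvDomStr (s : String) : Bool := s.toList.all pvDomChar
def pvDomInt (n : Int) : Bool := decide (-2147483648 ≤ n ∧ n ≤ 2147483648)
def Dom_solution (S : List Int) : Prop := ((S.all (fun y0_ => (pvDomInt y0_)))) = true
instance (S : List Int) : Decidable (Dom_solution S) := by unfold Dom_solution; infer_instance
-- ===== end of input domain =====

-- B replaces A's per-digit-sum lists (built in one pass, then each re-scanned with max/remove/max)
-- by a single pass that maintains only the two largest values per digit-sum key (objective: alternative).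

-- ===== PORT A =====
-- addDigits: sum(map(int, str(num).strip())); int(c) is ofChars? [c] with .getD 0 standing in for
-- the ValueError on '-' (negative num), which Pre_solution excludes.
def pyAddDigits (num : Int) : Int :=
  ((PySem.Chars.strip (PySem.Int.toChars num)).map (fun c => (PySem.Int.ofChars? [c]).getD 0)).sum

-- findMaxFromGroup: max(vals); vals.remove(largest); max(vals); the 0 defaults stand in for the
-- ValueError max([]) would raise — A only calls this with len(vals) >= 2, where they are unreachable.
def pyFindMaxFromGroup (vals : List Int) : Int :=
  match PySem.List.max? vals (fun x => x) with
  | none => 0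
  | some largest =>
    match PySem.List.remove? vals largest with
    | none => 0
    | some rest =>
      match PySem.List.max? rest (fun x => x) with
      | none => 0
      | some second => largest + second

def solution (S : List Int) : Int :=
  let valSumDict : PySem.Dict Int (List Int) :=
    S.foldl (fun d s =>
      let sumOfDigits := pyAddDigits s
      if d.contains sumOfDigits then
        d.insert sumOfDigits (((d.get? sumOfDigits).getD []) ++ [s])   -- valSumDict[k].append(s)
      else d.insert sumOfDigits [s]) PySem.Dict.empty
  valSumDict.values.foldl (fun maxValue listOfNos =>
    if 2 ≤ listOfNos.length then
      let biggestSum := pyFindMaxFromGroup listOfNos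
      if biggestSum > maxValue then biggestSum else maxValue
    else maxValue) (-1)

-- ===== PORT B =====
-- the update of the (largest, second-largest) pair at a key, Source B's if/elif chain
def pairUpd (p : Int × Option Int) (s : Int) : Int × Option Int :=
  match p with
  | (a, none) => if s ≥ a then (s, some a) else (a, some s)
  | (a, some b) => if s ≥ a then (s, some a) else if s > b then (a, some s) else (a, some b)

def solution_alt (S : List Int) : Int :=
  let top : PySem.Dict Int (Int × Option Int) :=
    S.foldl (fun t s =>
      let k := pyAddDigits s
      match t.get? k with
      | some p => t.insert k (pairUpd p s)
      | none => t.insert k (s, none)) PySem.Dict.empty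
  top.values.foldl (fun best p =>
    match p.2 with
    | some b => if p.1 + b > best then p.1 + b else best
    | none => best) (-1)

-- ===== PRECONDITION & SPEC =====
-- A raises ValueError on any negative element (int('-') while summing the digits of str(s)),
-- so Pre_ admits exactly the lists of non-negative integers; B raises there too.
def Pre_solution (S : List Int) : Prop := ∀ s ∈ S, 0 ≤ s
instance (S : List Int) : Decidable (Pre_solution S) := by unfold Pre_solution; infer_instance

def pvWitness_solution : List Int := ([10, 1, 19, 28])

def Spec_solution (S : List Int) (out : Int) : Prop := out = solution_alt S
instance (S : List Int) (out : Int) : Decidable (Spec_solution S out) := by unfold Spec_solution; infer_instance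

-- ===== CLAIM (what is proved, stated in full; the proofs are below) =====
def Claim_equal_solution : Prop := ∀ (S : List Int), Dom_solution S → Pre_solution S → Spec_solution S (solution S)

-- ===== LEMMAS AND PROOFS =====

-- the (largest, second-largest) pair of a nonempty list, as B's fold computes it
def pairOf : List Int → Int × Option Int
  | [] => (0, none)
  | x :: xs => xs.foldl pairUpd (x, none)

def fmap : Int × List Int → Int × (Int × Option Int) := fun p => (p.1, pairOf p.2)

def MaxOf (g : List Int) (m : Int) : Prop := m ∈ g ∧ ∀ y ∈ g, y ≤ m

theorem maxOf_unique {g : List Int} {m m' : Int} (h : MaxOf g m) (h' : MaxOf g m') : m = m' :=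
  le_antisymm (h'.2 m h.1) (h.2 m' h'.1)

theorem pairOf_concat (g : List Int) (hg : g ≠ []) (s : Int) :
    pairOf (g ++ [s]) = pairUpd (pairOf g) s := by
  cases g with
  | nil => exact absurd rfl hg
  | cons x xs => simp [pairOf, List.foldl_append]

theorem pairOf_spec (g : List Int) (hg : 2 ≤ g.length) :
    ∃ a b, pairOf g = (a, some b) ∧ MaxOf g a ∧ MaxOf (g.erase a) b := by
  induction g using List.reverseRecOn with
  | nil => simp at hg
  | append_singleton ys s ih =>
    match ys, ih with
    | [], _ => simp at hg
    | [x], _ =>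
      rw [List.singleton_append]
      refine if hsx : s ≥ x then ⟨s, x, ?_, ?_, ?_⟩ else ⟨x, s, ?_, ?_, ?_⟩
      · simp [pairOf, pairUpd, hsx]
      · exact ⟨by simp, by intro y hy; rcases (by simpa using hy) with h | h <;> omega⟩
      · by_cases hxs : x = s
        · subst hxs
          refine ⟨by simp, by intro y hy; simp at hy; omega⟩
        · have : ([x, s] : List Int).erase s = [x] := by
            simp [(by simpa using hxs : (x == s) = false)]
          rw [this]
          exact ⟨by simp, by intro y hy; simp at hy; omega⟩
      · simp [pairOf, pairUpd, hsx]
      · exact ⟨by simp, by intro y hy; rcases (by simpa using hy) with h | h <;> omega⟩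
      · have : ([x, s] : List Int).erase x = [s] := by simp
        rw [this]
        exact ⟨by simp, by intro y hy; simp at hy; omega⟩
    | x :: y :: t, ih =>
      have h2 : 2 ≤ (x :: y :: t).length := by simp
      obtain ⟨a, b, hp, hma, hmb⟩ := ih h2
      have hne : (x :: y :: t : List Int) ≠ [] := by simp
      have hba : b ≤ a := hma.2 b (List.erase_subset hmb.1)
      rw [pairOf_concat _ hne s, hp]
      by_cases h1 : s ≥ a
      · refine ⟨s, a, by simp [pairUpd, h1], ⟨by simp, ?_⟩, ?_⟩
        · intro z hz
          rcases List.mem_append.1 hz with h | h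
          · exact le_trans (hma.2 z h) h1
          · simp at h; omega
        · set g := (x :: y :: t : List Int)
          by_cases hsg : s ∈ g
          · rw [List.erase_append_left _ hsg]
            have hsa : s = a := le_antisymm (hma.2 s hsg) h1
            constructor
            · by_cases haseq : a = s
              · exact List.mem_append.2 (Or.inr (by simp [haseq]))
              · exact List.mem_append.2 (Or.inl ((List.mem_erase_of_ne haseq).2 hma.1))
            · intro z hz
              rcases List.mem_append.1 hz with h | h
              · exact hma.2 z (List.erase_subset h)
              · simp at h; omega
          · rw [List.erase_append_right _ hsg]
            simpa using hma
      · replace h1 : s < a := lt_of_not_ge h1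
        by_cases h2' : s > b
        · refine ⟨a, s, by simp only [pairUpd]; rw [if_neg (by omega), if_pos h2'], ⟨List.mem_append.2 (Or.inl hma.1), ?_⟩, ?_⟩
          · intro z hz
            rcases List.mem_append.1 hz with h | h
            · exact hma.2 z h
            · simp at h; omega
          · rw [List.erase_append_left _ hma.1]
            constructor
            · exact List.mem_append.2 (Or.inr (by simp))
            · intro z hz
              rcases List.mem_append.1 hz with h | h
              · exact le_trans (hmb.2 z h) (le_of_lt h2')
              · simp at h; omega
        · replace h2' : s ≤ b := le_of_not_gt h2'
          refine ⟨a, b, by simp only [pairUpd]; rw [if_neg (by omega), if_neg (by omega)], ⟨List.mem_append.2 (Or.inl hma.1), ?_⟩, ?_⟩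
          · intro z hz
            rcases List.mem_append.1 hz with h | h
            · exact hma.2 z h
            · simp at h; omega
          · rw [List.erase_append_left _ hma.1]
            constructor
            · exact List.mem_append.2 (Or.inl hmb.1)
            · intro z hz
              rcases List.mem_append.1 hz with h | h
              · exact hmb.2 z h
              · simp at h; omega

theorem findMax_eq (g : List Int) (a b : Int) (hma : MaxOf g a) (hmb : MaxOf (g.erase a) b) :
    pyFindMaxFromGroup g = a + b := by
  have hgne : g ≠ [] := by rintro rfl; simp [MaxOf] at hma
  cases hM : PySem.List.max? g (fun x => x) with
  | none => exact absurd ((PySem.List.max?_eq_none_iff _ _).1 hM) hgne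
  | some M =>
    have hMa : M = a :=
      maxOf_unique ⟨PySem.List.max?_mem hM, fun y hy => PySem.List.max?_isMax hM y hy⟩ hma
    subst hMa
    have hrem := PySem.List.remove?_eq_some_erase g M hma.1
    have hbe : b ∈ g.erase M := hmb.1
    cases hm2 : PySem.List.max? (g.erase M) (fun x => x) with
    | none =>
      rw [(PySem.List.max?_eq_none_iff _ _).1 hm2] at hbe
      simp at hbe
    | some m2 =>
      have hm2b : m2 = b :=
        maxOf_unique ⟨PySem.List.max?_mem hm2, fun y hy => PySem.List.max?_isMax hm2 y hy⟩ hmb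
      subst hm2b
      simp [pyFindMaxFromGroup, hM, hrem, hm2]

theorem step_eq (best : Int) (g : List Int) (hg : g ≠ []) :
    (match (pairOf g).2 with
     | some b => if (pairOf g).1 + b > best then (pairOf g).1 + b else best
     | none => best)
    = (if 2 ≤ g.length then
         if pyFindMaxFromGroup g > best then pyFindMaxFromGroup g else best
       else best) := by
  by_cases h2 : 2 ≤ g.length
  · obtain ⟨a, b, hp, hma, hmb⟩ := pairOf_spec g h2
    rw [hp, if_pos h2, findMax_eq g a b hma hmb]
  · obtain ⟨x, rfl⟩ : ∃ x, g = [x] := by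
      cases g with
      | nil => exact absurd rfl hg
      | cons x xs =>
        cases xs with
        | nil => exact ⟨x, rfl⟩
        | cons y t => exact absurd (by simp) h2
    rw [if_neg h2]
    simp [pairOf]

theorem get?_map (l : List (Int × List Int)) (k : Int) :
    (PySem.Dict.mk (l.map fmap)).get? k = ((PySem.Dict.mk l).get? k).map pairOf := by
  induction l with
  | nil => simp [PySem.Dict.get?]
  | cons p t ih =>
    obtain ⟨pk, pv⟩ := p
    simp only [List.map_cons, fmap, PySem.Dict.get?_mk_cons]
    split <;> simp [ih]

def stepA (d : PySem.Dict Int (List Int)) (s : Int) : PySem.Dict Int (List Int) :=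
  let sumOfDigits := pyAddDigits s
  if d.contains sumOfDigits then
    d.insert sumOfDigits (((d.get? sumOfDigits).getD []) ++ [s])
  else d.insert sumOfDigits [s]

def stepB (t : PySem.Dict Int (Int × Option Int)) (s : Int) : PySem.Dict Int (Int × Option Int) :=
  let k := pyAddDigits s
  match t.get? k with
  | some p => t.insert k (pairUpd p s)
  | none => t.insert k (s, none)

theorem step_pres (dA : PySem.Dict Int (List Int)) (dB : PySem.Dict Int (Int × Option Int))
    (s : Int) (H : dB.items = dA.items.map fmap)
    (H2 : ∀ p ∈ dA.items, p.2 ≠ ([] : List Int)) :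
    (stepB dB s).items = (stepA dA s).items.map fmap ∧
    (∀ p ∈ (stepA dA s).items, p.2 ≠ ([] : List Int)) := by
  obtain ⟨lA⟩ := dA
  obtain ⟨lB⟩ := dB
  have HlB : lB = lA.map fmap := H
  subst HlB
  have hget := get?_map lA (pyAddDigits s)
  cases hA : (PySem.Dict.mk lA).get? (pyAddDigits s) with
  | none =>
    have hcA : (PySem.Dict.mk lA).contains (pyAddDigits s) = false := by
      rw [PySem.Dict.contains_eq_isSome_get?, hA]; rfl
    have hcB : (PySem.Dict.mk (lA.map fmap)).contains (pyAddDigits s) = false := by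
      rw [PySem.Dict.contains_eq_isSome_get?, hget, hA]; rfl
    constructor
    · show (stepB ⟨lA.map fmap⟩ s).items = (stepA ⟨lA⟩ s).items.map fmap
      unfold stepA stepB
      rw [hA] at hget
      simp only [hget, Option.map_none, hcA, Bool.false_eq_true, if_false]
      rw [PySem.Dict.items_insert_of_not_contains _ _ hcB,
          PySem.Dict.items_insert_of_not_contains _ _ hcA]
      simp [fmap, pairOf]
    · intro p hp
      unfold stepA at hp
      simp only [hcA, Bool.false_eq_true, if_false] at hp
      rw [PySem.Dict.items_insert_of_not_contains _ _ hcA] at hp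
      rcases List.mem_append.1 hp with h | h
      · exact H2 p h
      · simp at h; subst h; simp
  | some g =>
    have hgne : g ≠ [] := H2 (pyAddDigits s, g) (PySem.Dict.mem_items_of_get?_eq_some _ hA)
    have hcA : (PySem.Dict.mk lA).contains (pyAddDigits s) = true := by
      rw [PySem.Dict.contains_eq_isSome_get?, hA]; rfl
    have hcB : (PySem.Dict.mk (lA.map fmap)).contains (pyAddDigits s) = true := by
      rw [PySem.Dict.contains_eq_isSome_get?, hget, hA]; rfl
    constructor
    · show (stepB ⟨lA.map fmap⟩ s).items = (stepA ⟨lA⟩ s).items.map fmap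
      unfold stepA stepB
      rw [hA] at hget
      simp only [hget, Option.map_some, hcA, if_true, hA, Option.getD_some]
      rw [PySem.Dict.items_insert_of_contains _ _ hcB,
          PySem.Dict.items_insert_of_contains _ _ hcA]
      show (lA.map fmap).map _ = (lA.map _).map fmap
      rw [List.map_map, List.map_map]
      apply List.map_congr_left
      intro p _
      by_cases hpk : (p.1 == pyAddDigits s) = true
      · simp only [Function.comp, fmap, hpk, if_true]
        rw [pairOf_concat g hgne s]
      · simp only [Function.comp, fmap, hpk]
        simp
    · intro p hp
      unfold stepA at hp
      simp only [hcA, if_true, hA, Option.getD_some] at hp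
      rw [PySem.Dict.items_insert_of_contains _ _ hcA] at hp
      obtain ⟨q, hq, rfl⟩ := List.mem_map.1 hp
      by_cases hqk : (q.1 == pyAddDigits s) = true
      · simp [hqk]
      · simpa [hqk] using H2 q hq

theorem build (S : List Int) :
    ∀ (dA : PySem.Dict Int (List Int)) (dB : PySem.Dict Int (Int × Option Int)),
    dB.items = dA.items.map fmap →
    (∀ p ∈ dA.items, p.2 ≠ ([] : List Int)) →
    (S.foldl stepB dB).items = (S.foldl stepA dA).items.map fmap ∧
    (∀ p ∈ (S.foldl stepA dA).items, p.2 ≠ ([] : List Int)) := by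
  induction S with
  | nil => intro dA dB H H2; exact ⟨H, H2⟩
  | cons s S ih =>
    intro dA dB H H2
    simp only [List.foldl_cons]
    obtain ⟨H', H2'⟩ := step_pres dA dB s H H2
    exact ih _ _ H' H2'

-- ===== VERDICT (by name: the statement is the Claim_ definition above) =====
theorem solution_spec : Claim_equal_solution := by
  intro S _ _
  unfold Spec_solution
  have hA : solution S =
      (S.foldl stepA PySem.Dict.empty).values.foldl
        (fun maxValue listOfNos =>
          if 2 ≤ listOfNos.length then
            if pyFindMaxFromGroup listOfNos > maxValue then pyFindMaxFromGroup listOfNos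
            else maxValue
          else maxValue) (-1) := rfl
  have hB : solution_alt S =
      (S.foldl stepB PySem.Dict.empty).values.foldl
        (fun best p =>
          match p.2 with
          | some b => if p.1 + b > best then p.1 + b else best
          | none => best) (-1) := rfl
  obtain ⟨Hit, Hne⟩ := build S PySem.Dict.empty PySem.Dict.empty (by rfl) (by simp [PySem.Dict.empty])
  rw [hA, hB]
  simp only [PySem.Dict.values, Hit, List.map_map]
  rw [List.foldl_map, List.foldl_map]
  apply PySem.List.foldl_congr_mem
  intro acc p hp
  exact (step_eq acc p.2 (Hne p hp)).symm
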